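-- pv_equiv track=rewrite | github.com/nrsyed/chem | electron_config/configuration.py | get_subshells
-- ===== SOURCE A (Python) =====
-- def get_subshells(num_electrons):
--     """
--     Return a list of tuples corresponding to subshells of the element with
--     the given number of electrons. Each tuple contains the principle quantum
--     number, azimuthal quantum number, and number of electrons in the subshell.
--     Subshells are filled per the Madelung rule.
--     """
--     subshells = []
--     diag = -1
--     j = 0
--     while num_electrons > 0:
--         if j >= (diag // 2) + 1:
--             diag += 1
--             j = 0
--         pqn = (diag // 2) + (diag % 2) + j
--         aqn = (diag // 2) - j
--         subshells.append((pqn, aqn, min(4 * aqn + 2, num_electrons)))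
--         num_electrons -= 4 * aqn + 2
--         j += 1
--     return subshells
-- ===== SOURCE B (Python) =====
-- def get_subshells(num_electrons):
--     """
--     Table-then-fill: first size a table of (n, l) subshell pairs whose total
--     capacity covers num_electrons (whole Madelung diagonals), sort it into
--     Madelung order by key (n + l, n), then make one filling pass over it.
--     """
--     cap, d = 0, 0
--     while cap < num_electrons:
--         cap += 2 * (d // 2 + 1) ** 2
--         d += 1
--     pairs = [(n, l) for n in range(d) for l in range(min(n, d - 1 - n) + 1)]
--     order = sorted(pairs, key=lambda p: (p[0] + p[1], p[0]))
--     subshells = []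
--     rem = num_electrons
--     for n, l in order:
--         if rem <= 0:
--             break
--         subshells.append((n, l, min(4 * l + 2, rem)))
--         rem -= 4 * l + 2
--     return subshells
-- ===== Notes on version B (the rewrite author's own statement) =====
-- stated objective: alternative
-- what changed: Replaces A's single while-loop state machine (manual diag/j counters interleaving enumeration with filling) by a table-then-fill design: size a capacity-covering table of (n,l) pairs, sort it into Madelung order by key (n+l, n), then make one simple filling pass.
import Mathlib
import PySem

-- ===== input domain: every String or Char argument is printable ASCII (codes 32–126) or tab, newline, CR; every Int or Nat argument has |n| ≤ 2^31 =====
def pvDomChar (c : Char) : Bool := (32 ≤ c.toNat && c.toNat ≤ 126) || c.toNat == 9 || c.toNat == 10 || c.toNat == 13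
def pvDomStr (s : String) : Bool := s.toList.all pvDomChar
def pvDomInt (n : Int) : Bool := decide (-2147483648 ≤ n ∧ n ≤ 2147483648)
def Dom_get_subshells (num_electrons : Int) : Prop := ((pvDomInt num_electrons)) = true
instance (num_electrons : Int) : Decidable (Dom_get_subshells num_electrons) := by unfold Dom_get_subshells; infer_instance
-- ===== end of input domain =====

-- B replaces A's single while-loop state machine (manual diag/j counters with
-- interleaved filling) by a table-then-fill design: size a capacity-covering
-- (n,l) subshell table, sort it into Madelung order by key (n+l, n), then make
-- one filling pass; objective: alternative (same exact result, similar cost).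


-- ===== PORT A =====
-- A's while-loop, one fuel step per iteration; each iteration consumes at
-- least 2 electrons, so fuel `num_electrons.toNat` is never exhausted.
def pvLoopA : Nat → Int → Int → Int → List (Int × Int × Int)
  | 0, _, _, _ => []
  | fuel + 1, ne, diag, j =>
    if ne > 0 then
      let diag' := if j ≥ PySem.Int.floordiv diag 2 + 1 then diag + 1 else diag
      let j' := if j ≥ PySem.Int.floordiv diag 2 + 1 then 0 else j
      let pqn := PySem.Int.floordiv diag' 2 + PySem.Int.mod diag' 2 + j'
      let aqn := PySem.Int.floordiv diag' 2 - j'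
      (pqn, aqn, min (4 * aqn + 2) ne) :: pvLoopA fuel (ne - (4 * aqn + 2)) diag' (j' + 1)
    else []

def get_subshells (num_electrons : Int) : List (Int × Int × Int) :=
  pvLoopA num_electrons.toNat num_electrons (-1) 0

-- ===== PORT B =====
-- Source B's capacity-sizing while-loop, one fuel step per iteration; each
-- iteration adds at least 2 to cap, so fuel `num_electrons.toNat` is never
-- exhausted.
def pvCapLoop : Nat → Int → Int → Int → Int × Int
  | 0, _, cap, d => (cap, d)
  | fuel + 1, ne, cap, d =>
    if cap < ne then
      pvCapLoop fuel ne (cap + 2 * (PySem.Int.floordiv d 2 + 1) ^ 2) (d + 1)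
    else (cap, d)

def pvPairs (d : Int) : List (Int × Int) :=
  (PySem.List.pyRange 0 d 1).flatMap fun n =>
    (PySem.List.pyRange 0 (min n (d - 1 - n) + 1) 1).map fun l => (n, l)

def pvFill : Int → List (Int × Int) → List (Int × Int × Int)
  | _, [] => []
  | rem, (n, l) :: rest =>
    if rem ≤ 0 then [] else (n, l, min (4 * l + 2) rem) :: pvFill (rem - (4 * l + 2)) rest

def get_subshells_alt (num_electrons : Int) : List (Int × Int × Int) :=
  let cd := pvCapLoop num_electrons.toNat num_electrons 0 0
  pvFill num_electrons
    (PySem.List.sorted2 (pvPairs cd.2) (fun p => p.1 + p.2) (fun p => p.1) false)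

-- ===== PRECONDITION & SPEC =====
def Spec_get_subshells (num_electrons : Int) (out : List (Int × Int × Int)) : Prop := out = get_subshells_alt num_electrons
instance (num_electrons : Int) (out : List (Int × Int × Int)) : Decidable (Spec_get_subshells num_electrons out) := by unfold Spec_get_subshells; infer_instance

-- ===== CLAIM (what is proved, stated in full; the proofs are below) =====
def Claim_equal_get_subshells : Prop := ∀ (num_electrons : Int), Dom_get_subshells num_electrons → Spec_get_subshells num_electrons (get_subshells num_electrons)

-- ===== LEMMAS AND PROOFS =====

def pvPairOf (e j : Nat) : Int × Int := (((e - (e / 2 - j) : Nat) : Int), ((e / 2 - j : Nat) : Int))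

def pvRow (e : Nat) : List (Int × Int) := (List.range (e / 2 + 1)).map (pvPairOf e)

def pvDiagList (D : Nat) : List (Int × Int) := (List.range D).flatMap pvRow

def pvStream : Nat → Nat → Nat → List (Int × Int)
  | 0, _, _ => []
  | f + 1, e, j =>
    pvPairOf e j :: (if j + 1 ≥ e / 2 + 1 then pvStream f (e + 1) 0 else pvStream f e (j + 1))

def pvCap (xs : List (Int × Int)) : Int := (xs.map (fun p => 4 * p.2 + 2)).sum

def pvLenUpTo : Nat → Nat
  | 0 => 0
  | D + 1 => pvLenUpTo D + (D / 2 + 1)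

theorem pvStream_prefix : ∀ (f g e j : Nat), f ≤ g → pvStream f e j <+: pvStream g e j := by
  intro f
  induction f with
  | zero => intro g e j _; exact List.nil_prefix
  | succ f ih =>
    intro g e j hfg
    obtain ⟨g', rfl⟩ : ∃ g', g = g' + 1 := ⟨g - 1, by omega⟩
    simp only [pvStream]
    split
    · exact (List.cons_prefix_cons).2 ⟨rfl, ih g' (e+1) 0 (by omega)⟩
    · exact (List.cons_prefix_cons).2 ⟨rfl, ih g' e (j+1) (by omega)⟩

theorem pvCap_stream : ∀ (f e j : Nat), 2 * (f : Int) ≤ pvCap (pvStream f e j) := by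
  intro f
  induction f with
  | zero => intro e j; simp [pvStream, pvCap]
  | succ f ih =>
    intro e j
    have hp : (0:Int) ≤ (pvPairOf e j).2 := by simp [pvPairOf]
    simp only [pvStream]
    split
    · have h := ih (e+1) 0
      simp only [pvCap, List.map_cons, List.sum_cons]
      simp only [pvCap] at h
      push_cast
      omega
    · have h := ih e (j+1)
      simp only [pvCap, List.map_cons, List.sum_cons]
      simp only [pvCap] at h
      push_cast
      omega

theorem pvStream_row : ∀ (r g e j : Nat), j + r = e / 2 →
    pvStream (r + 1 + g) e j = ((List.range (r + 1)).map (fun i => pvPairOf e (j + i))) ++ pvStream g (e + 1) 0 := by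
  intro r
  induction r with
  | zero =>
    intro g e j hj
    have h1 : 0 + 1 + g = g + 1 := by omega
    rw [h1]
    simp only [pvStream]
    rw [if_pos (by omega)]
    simp
  | succ r ih =>
    intro g e j hj
    have h1 : r + 1 + 1 + g = (r + 1 + g) + 1 := by omega
    rw [h1]
    simp only [pvStream]
    rw [if_neg (by omega), ih g e (j+1) (by omega)]
    conv_rhs => rw [List.range_succ_eq_map]
    simp only [List.map_cons, List.map_map, List.cons_append]
    have hmap : List.map (fun i => pvPairOf e (j + 1 + i)) (List.range (r + 1))
        = List.map ((fun i => pvPairOf e (j + i)) ∘ Nat.succ) (List.range (r + 1)) := by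
      apply List.map_congr_left
      intro a _
      show pvPairOf e (j + 1 + a) = pvPairOf e (j + (a + 1))
      congr 1
      omega
    rw [hmap]
    simp

theorem pvFill_append : ∀ (xs : List (Int × Int)) (ne : Int) (t : List (Int × Int)), ne ≤ pvCap xs →
    pvFill ne (xs ++ t) = pvFill ne xs := by
  intro xs
  induction xs with
  | nil =>
    intro ne t h
    simp only [pvCap, List.map_nil, List.sum_nil] at h
    cases t with
    | nil => rfl
    | cons p rest =>
      obtain ⟨n, l⟩ := p
      simp only [List.nil_append, pvFill]
      rw [if_pos h]
  | cons p xs ih =>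
    intro ne t h
    obtain ⟨n, l⟩ := p
    simp only [List.cons_append, pvFill]
    by_cases hne : ne ≤ 0
    · rw [if_pos hne, if_pos hne]
    · rw [if_neg hne, if_neg hne]
      congr 1
      apply ih
      simp only [pvCap, List.map_cons, List.sum_cons] at h
      simp only [pvCap]
      omega

theorem pvStream_diag : ∀ (D g : Nat), pvStream (pvLenUpTo D + g) 0 0 = pvDiagList D ++ pvStream g D 0 := by
  intro D
  induction D with
  | zero => intro g; simp [pvLenUpTo, pvDiagList]
  | succ D ih =>
    intro g
    have h1 : pvLenUpTo (D + 1) + g = pvLenUpTo D + (D / 2 + 1 + g) := by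
      simp only [pvLenUpTo]; omega
    rw [h1, ih (D / 2 + 1 + g), pvStream_row (D / 2) g D 0 (by omega)]
    simp [pvDiagList, List.range_succ, pvRow]

theorem pvRowSum : ∀ m : Nat, ((List.range (m + 1)).map (fun j => (4 * ((m - j : Nat) : Int) + 2))).sum = 2 * ((m : Int) + 1) ^ 2 := by
  intro m
  induction m with
  | zero => simp
  | succ m ih =>
    conv_lhs => rw [List.range_succ_eq_map]
    simp only [List.map_cons, List.sum_cons, List.map_map]
    have hmap : List.map ((fun j => (4 * ((m + 1 - j : Nat) : Int) + 2)) ∘ Nat.succ) (List.range (m + 1))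
        = List.map (fun j => (4 * ((m - j : Nat) : Int) + 2)) (List.range (m + 1)) := by
      apply List.map_congr_left
      intro a _
      show (4 * ((m + 1 - (a + 1) : Nat) : Int) + 2) = _
      congr 2
      omega
    rw [hmap, ih]
    push_cast
    ring

theorem pvCap_row (e : Nat) : pvCap (pvRow e) = 2 * ((e / 2 : Nat) + 1 : Int) ^ 2 := by
  have h := pvRowSum (e / 2)
  simp only [pvCap, pvRow, List.map_map]
  rw [← h]
  apply congrArg
  apply List.map_congr_left
  intro a _
  simp [pvPairOf, Function.comp]

theorem pvCap_diag_succ (D : Nat) : pvCap (pvDiagList (D + 1)) = pvCap (pvDiagList D) + pvCap (pvRow D) := by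
  simp [pvDiagList, List.range_succ, pvCap]

theorem pvCapLoop_spec : ∀ (fuel : Nat) (ne cap d : Int), 0 ≤ d →
    cap = pvCap (pvDiagList d.toNat) → ne ≤ cap + 2 * fuel →
    0 ≤ (pvCapLoop fuel ne cap d).2 ∧
    (pvCapLoop fuel ne cap d).1 = pvCap (pvDiagList (pvCapLoop fuel ne cap d).2.toNat) ∧
    ne ≤ (pvCapLoop fuel ne cap d).1 := by
  intro fuel
  induction fuel with
  | zero =>
    intro ne cap d hd hcap hle
    simp only [pvCapLoop]
    refine ⟨hd, hcap, by push_cast at hle; omega⟩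
  | succ fuel ih =>
    intro ne cap d hd hcap hle
    simp only [pvCapLoop]
    by_cases h : cap < ne
    · rw [if_pos h]
      have hfd : PySem.Int.floordiv d 2 = ((d.toNat / 2 : Nat) : Int) := by
        conv_lhs => rw [show d = ((d.toNat : Nat) : Int) by omega]
        exact_mod_cast PySem.Int.floordiv_natCast d.toNat 2
      have hd1 : (d + 1).toNat = d.toNat + 1 := by omega
      have hcap' : cap + 2 * (PySem.Int.floordiv d 2 + 1) ^ 2 = pvCap (pvDiagList ((d + 1).toNat)) := by
        rw [hd1, pvCap_diag_succ, pvCap_row, ← hcap, hfd]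
      have hpos : (1:Int) ≤ (PySem.Int.floordiv d 2 + 1) ^ 2 := by
        have : (0:Int) ≤ ((d.toNat / 2 : Nat) : Int) := by positivity
        rw [hfd]; nlinarith
      exact ih ne _ (d + 1) (by omega) hcap' (by push_cast at hle ⊢; omega)
    · rw [if_neg h]
      exact ⟨hd, hcap, by omega⟩

theorem pvMem_pairs (d : Int) (p : Int × Int) :
    p ∈ pvPairs d ↔ 0 ≤ p.2 ∧ p.2 ≤ p.1 ∧ p.1 + p.2 ≤ d - 1 := by
  obtain ⟨n, l⟩ := p
  simp only [pvPairs, List.mem_flatMap, List.mem_map, PySem.List.mem_pyRange_one]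
  constructor
  · rintro ⟨a, ⟨ha0, had⟩, b, ⟨hb0, hbm⟩, heq⟩
    injection heq with h1 h2
    subst h1; subst h2
    omega
  · rintro ⟨h1, h2, h3⟩
    exact ⟨n, ⟨by omega, by omega⟩, l, ⟨by omega, by omega⟩, rfl⟩

theorem pvMem_diagList (D : Nat) (p : Int × Int) :
    p ∈ pvDiagList D ↔ ∃ n l : Nat, p = ((n : Int), (l : Int)) ∧ l ≤ n ∧ n + l < D := by
  simp only [pvDiagList, List.mem_flatMap, List.mem_range, pvRow, List.mem_map]
  constructor
  · rintro ⟨e, he, j, hj, rfl⟩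
    refine ⟨e - (e / 2 - j), e / 2 - j, rfl, by omega, by omega⟩
  · rintro ⟨n, l, rfl, hln, hD⟩
    refine ⟨n + l, hD, (n + l) / 2 - l, ?_, ?_⟩
    · omega
    · simp only [pvPairOf, Prod.mk.injEq]
      constructor
      · congr 1; omega
      · congr 1; omega

theorem pvPairOf_sum (e j : Nat) : (pvPairOf e j).1 + (pvPairOf e j).2 = (e : Int) := by
  simp only [pvPairOf]; omega

theorem pvRow_getElem (e : Nat) (i : Nat) (hi : i < (pvRow e).length) :
    (pvRow e)[i] = pvPairOf e i := by
  simp [pvRow]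

theorem pvDiagList_pairwise (D : Nat) :
    (pvDiagList D).Pairwise (fun p q : Int × Int =>
      toLex (p.1 + p.2, p.1) < toLex (q.1 + q.2, q.1)) := by
  induction D with
  | zero => simp [pvDiagList]
  | succ D ih =>
    have hsplit : pvDiagList (D + 1) = pvDiagList D ++ pvRow D := by
      simp [pvDiagList, List.range_succ]
    rw [hsplit, List.pairwise_append]
    refine ⟨ih, ?_, ?_⟩
    · rw [List.pairwise_iff_getElem]
      intro i j hi hj hij
      rw [pvRow_getElem D i hi, pvRow_getElem D j hj]
      have hlen : (pvRow D).length = D / 2 + 1 := by simp [pvRow]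
      rw [hlen] at hi hj
      rw [Prod.Lex.lt_iff]
      simp only [ofLex_toLex]
      right
      constructor
      · rw [pvPairOf_sum, pvPairOf_sum]
      · simp only [pvPairOf]; omega
    · intro a ha b hb
      have ha' := (pvMem_diagList D a).1 ha
      obtain ⟨n, l, rfl, hln, hD⟩ := ha'
      have hb' : b ∈ pvRow D := hb
      obtain ⟨j, hj, rfl⟩ := List.mem_map.1 hb'
      rw [Prod.Lex.lt_iff]
      simp only [ofLex_toLex]
      left
      rw [pvPairOf_sum]
      omega

theorem pvPairs_nodup (d : Int) : (pvPairs d).Nodup := by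
  rw [pvPairs, List.nodup_flatMap]
  constructor
  · intro n _
    apply List.Nodup.map
    · intro a b hab
      injection hab
    · exact PySem.List.nodup_pyRange_one 0 _
  · have hp := PySem.List.pairwise_lt_pyRange_one 0 d 
    apply hp.imp
    intro a b hab x hxa hxb
    obtain ⟨la, _, rfl⟩ := List.mem_map.1 hxa
    obtain ⟨lb, _, heq⟩ := List.mem_map.1 hxb
    injection heq with h1 h2
    omega

theorem pvInsertBy_congr {α : Type} (f g : α → α → Bool) (h : ∀ a b, f a b = g a b) (x : α) :
    ∀ acc : List α, PySem.List.insertBy f x acc = PySem.List.insertBy g x acc := by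
  intro acc
  induction acc with
  | nil => rfl
  | cons y ys ih =>
    simp only [PySem.List.insertBy]
    rw [h x y, ih]

theorem pvFoldl_insertBy_congr {α : Type} (f g : α → α → Bool) (h : ∀ a b, f a b = g a b) :
    ∀ (xs acc : List α),
      xs.foldl (fun acc x => PySem.List.insertBy f x acc) acc
        = xs.foldl (fun acc x => PySem.List.insertBy g x acc) acc := by
  intro xs
  induction xs with
  | nil => intro acc; rfl
  | cons y ys ih =>
    intro acc
    simp only [List.foldl_cons]
    rw [pvInsertBy_congr f g h y acc]
    exact ih _

theorem pvSorted2_eq_sorted_lex (xs : List (Int × Int)) :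
    PySem.List.sorted2 xs (fun p => p.1 + p.2) (fun p => p.1) false
      = PySem.List.sorted xs (fun p => (toLex (p.1 + p.2, p.1) : Lex (Int × Int))) false := by
  rw [PySem.List.sorted_eq_foldl_insertBy]
  simp only [PySem.List.sorted2, Bool.false_eq_true, if_false]
  apply pvFoldl_insertBy_congr
  intro a b
  simp only [← decide_not, ← Bool.decide_and, ← Bool.decide_or]
  apply decide_eq_decide.mpr
  rw [Prod.Lex.lt_iff]
  simp only [ofLex_toLex]
  omega

theorem pvDiagList_nodup (D : Nat) : (pvDiagList D).Nodup := by
  apply (pvDiagList_pairwise D).imp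
  intro a b hab hEq
  subst hEq
  exact lt_irrefl _ hab

theorem pvSorted_eq_diagList (d : Int) (hd : 0 ≤ d) :
    PySem.List.sorted2 (pvPairs d) (fun p => p.1 + p.2) (fun p => p.1) false = pvDiagList d.toNat := by
  rw [pvSorted2_eq_sorted_lex]
  apply PySem.List.sorted_eq_of_perm_of_pairwise_lt
  · rw [List.perm_ext_iff_of_nodup (pvDiagList_nodup d.toNat) (pvPairs_nodup d)]
    intro p
    rw [pvMem_diagList, pvMem_pairs]
    constructor
    · rintro ⟨n, l, rfl, hln, hD⟩
      simp only
      omega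
    · rintro ⟨h1, h2, h3⟩
      obtain ⟨x, y⟩ := p
      simp only at h1 h2 h3
      refine ⟨x.toNat, y.toNat, ?_, by omega, by omega⟩
      simp only [Prod.mk.injEq]
      omega
  · exact pvDiagList_pairwise d.toNat

theorem pvFloordiv_natCast2 (e : Nat) : PySem.Int.floordiv (e : Int) 2 = ((e / 2 : Nat) : Int) := by
  exact_mod_cast PySem.Int.floordiv_natCast e 2

theorem pvMod_natCast2 (e : Nat) : PySem.Int.mod (e : Int) 2 = ((e % 2 : Nat) : Int) := by
  exact_mod_cast PySem.Int.mod_natCast e 2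

theorem pvLoopA_stream : ∀ f : Nat,
    (∀ (ne : Int) (e j : Nat), j ≤ e / 2 →
      pvLoopA f ne (e : Int) (j : Int) = pvFill ne (pvStream f e j)) ∧
    (∀ (ne : Int) (e : Nat),
      pvLoopA f ne (e : Int) (((e / 2 : Nat) : Int) + 1) = pvFill ne (pvStream f (e + 1) 0)) := by
  intro f
  induction f with
  | zero =>
    refine ⟨fun ne e j _ => rfl, fun ne e => rfl⟩
  | succ f ih =>
    constructor
    · intro ne e j hj
      simp only [pvLoopA, pvStream]
      by_cases hne : ne > 0
      · rw [if_pos hne]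
        have hcond : ¬((j : Int) ≥ PySem.Int.floordiv (e : Int) 2 + 1) := by
          rw [pvFloordiv_natCast2]; push_cast; omega
        simp only [if_neg hcond]
        rw [pvFloordiv_natCast2, pvMod_natCast2]
        rcases hpq : pvPairOf e j with ⟨pn, pl⟩
        simp only [pvFill]
        rw [if_neg (by omega)]
        have hpn : pn = ((e / 2 : Nat) : Int) + ((e % 2 : Nat) : Int) + (j : Int) := by
          have h := congrArg Prod.fst hpq
          simp only [pvPairOf] at h
          omega
        have hpl : pl = ((e / 2 : Nat) : Int) - (j : Int) := by
          have h := congrArg Prod.snd hpq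
          simp only [pvPairOf] at h
          omega
        subst hpn
        subst hpl
        congr 1
        by_cases hj1 : j + 1 ≥ e / 2 + 1
        · rw [if_pos hj1]
          have hje : j = e / 2 := by omega
          subst hje
          exact ih.2 _ e
        · rw [if_neg hj1]
          have hc : ((j : Int) + 1) = ((j + 1 : Nat) : Int) := by push_cast; omega
          rw [hc]
          exact ih.1 _ e (j + 1) (by omega)
      · rw [if_neg hne]
        rcases hpq : pvPairOf e j with ⟨pn, pl⟩
        simp only [pvFill]
        rw [if_pos (by omega)]
    · intro ne e
      simp only [pvLoopA, pvStream]
      by_cases hne : ne > 0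
      · rw [if_pos hne]
        have hcond : (((e / 2 : Nat) : Int) + 1) ≥ PySem.Int.floordiv (e : Int) 2 + 1 := by
          rw [pvFloordiv_natCast2]
        simp only [if_pos hcond]
        have hcast : (e : Int) + 1 = ((e + 1 : Nat) : Int) := by push_cast; omega
        rw [hcast, pvFloordiv_natCast2, pvMod_natCast2]
        rcases hpq : pvPairOf (e + 1) 0 with ⟨pn, pl⟩
        simp only [pvFill]
        rw [if_neg (by omega)]
        have hpn : pn = (((e + 1) / 2 : Nat) : Int) + (((e + 1) % 2 : Nat) : Int) + (0 : Int) := by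
          have h := congrArg Prod.fst hpq
          simp only [pvPairOf] at h
          omega
        have hpl : pl = (((e + 1) / 2 : Nat) : Int) - (0 : Int) := by
          have h := congrArg Prod.snd hpq
          simp only [pvPairOf] at h
          omega
        subst hpn
        subst hpl
        congr 1
        by_cases h1 : 0 + 1 ≥ (e + 1) / 2 + 1
        · rw [if_pos h1]
          have hc : ((0 : Int) + 1) = (((e + 1) / 2 : Nat) : Int) + 1 := by
            have h0 : (e + 1) / 2 = 0 := by omega
            rw [h0]
            norm_num
          rw [hc]
          exact ih.2 _ (e + 1)
        · rw [if_neg h1]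
          have hc : ((0 : Int) + 1) = ((1 : Nat) : Int) := by norm_num
          rw [hc]
          exact ih.1 _ (e + 1) 1 (by omega)
      · rw [if_neg hne]
        rcases hpq : pvPairOf (e + 1) 0 with ⟨pn, pl⟩
        simp only [pvFill]
        rw [if_pos (by omega)]

theorem pvA_eq_fill_stream (ne : Int) :
    get_subshells ne = pvFill ne (pvStream ne.toNat 0 0) := by
  by_cases hne : ne ≤ 0
  · have h0 : ne.toNat = 0 := by omega
    rw [get_subshells, h0]
    rfl
  · have h0 : ne.toNat = (ne.toNat - 1) + 1 := by omega
    rw [get_subshells, h0]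
    simp only [pvLoopA, pvStream]
    rw [if_pos (by omega)]
    have hcond : ((0 : Int) ≥ PySem.Int.floordiv (-1) 2 + 1) := by decide
    simp only [if_pos hcond]
    have h1 : (-1 : Int) + 1 = ((0 : Nat) : Int) := by norm_num
    rw [h1, pvFloordiv_natCast2, pvMod_natCast2]
    rcases hpq : pvPairOf 0 0 with ⟨pn, pl⟩
    simp only [pvFill]
    rw [if_neg (by omega)]
    have hpn : pn = 0 := by
      have h := congrArg Prod.fst hpq
      simp only [pvPairOf] at h
      omega
    have hpl : pl = 0 := by
      have h := congrArg Prod.snd hpq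
      simp only [pvPairOf] at h
      omega
    subst hpn
    subst hpl
    norm_num
    have h2 := (pvLoopA_stream (ne.toNat - 1)).2 (ne - 2) 0
    norm_num at h2
    exact h2

theorem pvMain (ne : Int) : get_subshells ne = get_subshells_alt ne := by
  by_cases hne : ne ≤ 0
  · have h0 : ne.toNat = 0 := by omega
    simp only [get_subshells, get_subshells_alt, h0]
    rfl
  · have hA := pvA_eq_fill_stream ne
    have hcl := pvCapLoop_spec ne.toNat ne 0 0 (le_refl 0) (by rfl) (by omega)
    obtain ⟨hd0, hcap, hnle⟩ := hcl
    have hB : get_subshells_alt ne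
        = pvFill ne (pvDiagList (pvCapLoop ne.toNat ne 0 0).2.toNat) := by
      simp only [get_subshells_alt]
      rw [pvSorted_eq_diagList _ hd0]
    set D := (pvCapLoop ne.toNat ne 0 0).2.toNat with hD
    set F := max ne.toNat (pvLenUpTo D) with hF
    obtain ⟨t1, ht1⟩ := pvStream_prefix ne.toNat F 0 0 (le_max_left _ _)
    have hcap1 : ne ≤ pvCap (pvStream ne.toNat 0 0) :=
      le_trans (by omega) (pvCap_stream ne.toNat 0 0)
    have e1 : pvFill ne (pvStream F 0 0) = pvFill ne (pvStream ne.toNat 0 0) := by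
      rw [← ht1]
      exact pvFill_append _ ne t1 hcap1
    have hF2 : pvLenUpTo D + (F - pvLenUpTo D) = F := by
      have := le_max_right ne.toNat (pvLenUpTo D)
      omega
    have e2 : pvFill ne (pvStream F 0 0) = pvFill ne (pvDiagList D) := by
      rw [← hF2, pvStream_diag D (F - pvLenUpTo D)]
      exact pvFill_append (pvDiagList D) ne _ (by rw [← hcap]; exact hnle)
    rw [hA, hB, ← e1, e2]

-- ===== VERDICT (by name: the statement is the Claim_ definition above) =====
theorem get_subshells_spec : Claim_equal_get_subshells := by
  intro num_electrons _
  exact pvMain num_electrons
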